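-- pv_equiv track=rewrite | github.com/lpappalard/pesquisa_relatorios_provinciais | minerar_relatorios_old.py | presidente_federal
-- ===== SOURCE A (Python) =====
-- PRESIDENTES = {
--     1889: "Deodoro da Fonseca",
--     1891: "Floriano Peixoto",
--     1894: "Prudente de Morais",
--     1898: "Campos Sales",
--     1902: "Rodrigues Alves",
--     1906: "Afonso Pena",
--     1909: "Nilo Peçanha",
--     1910: "Hermes da Fonseca",
--     1914: "Venceslau Brás",
--     1918: "Delfim Moreira",
--     1919: "Epitácio Pessoa",
--     1922: "Artur Bernardes",
--     1926: "Washington Luís",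
--     1930: "Getúlio Vargas"
-- }
--
-- def presidente_federal(ano):
--     if ano == "" or ano is None:
--         return ""
--     ano = int(ano)
--     escolhido = ""
--     for inicio, nome in sorted(PRESIDENTES.items()):
--         if ano >= inicio:
--             escolhido = nome
--     return escolhido
-- ===== SOURCE B (Python) =====
-- import bisect
--
-- PRESIDENTES = {
--     1889: "Deodoro da Fonseca",
--     1891: "Floriano Peixoto",
--     1894: "Prudente de Morais",
--     1898: "Campos Sales",
--     1902: "Rodrigues Alves",
--     1906: "Afonso Pena",
--     1909: "Nilo Peçanha",
--     1910: "Hermes da Fonseca",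
--     1914: "Venceslau Brás",
--     1918: "Delfim Moreira",
--     1919: "Epitácio Pessoa",
--     1922: "Artur Bernardes",
--     1926: "Washington Luís",
--     1930: "Getúlio Vargas"
-- }
--
-- _ANOS = sorted(PRESIDENTES)
--
-- def presidente_federal(ano):
--     if ano == "" or ano is None:
--         return ""
--     ano = int(ano)
--     i = bisect.bisect_right(_ANOS, ano)
--     return "" if i == 0 else PRESIDENTES[_ANOS[i - 1]]
-- ===== Notes on version B (the rewrite author's own statement) =====
-- stated objective: idiomatic
-- what changed: Replaces A's full linear scan (fold over all sorted (year, name) items, overwriting the accumulator) with bisect.bisect_right on a prebuilt sorted year index followed by a single dict lookup.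
import Mathlib
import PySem

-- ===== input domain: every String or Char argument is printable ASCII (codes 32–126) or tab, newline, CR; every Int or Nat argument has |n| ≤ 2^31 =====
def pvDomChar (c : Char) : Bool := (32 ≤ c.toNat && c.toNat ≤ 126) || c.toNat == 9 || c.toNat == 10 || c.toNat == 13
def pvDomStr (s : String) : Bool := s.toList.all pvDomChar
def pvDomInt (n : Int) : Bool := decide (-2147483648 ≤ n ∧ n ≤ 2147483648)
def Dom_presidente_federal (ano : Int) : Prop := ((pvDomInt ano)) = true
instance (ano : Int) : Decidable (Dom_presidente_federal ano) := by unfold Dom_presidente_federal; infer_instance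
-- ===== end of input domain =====

-- B replaces A's full linear scan over all presidency start years by a binary search (bisect_right) over the sorted year index; objective: alternative/idiomatic.

-- ===== PORT A =====
def presidentes : PySem.Dict Int String := PySem.Dict.ofList
  [(1889, "Deodoro da Fonseca"), (1891, "Floriano Peixoto"), (1894, "Prudente de Morais"), (1898, "Campos Sales"), (1902, "Rodrigues Alves"), (1906, "Afonso Pena"), (1909, "Nilo Peçanha"), (1910, "Hermes da Fonseca"), (1914, "Venceslau Brás"), (1918, "Delfim Moreira"), (1919, "Epitácio Pessoa"), (1922, "Artur Bernardes"), (1926, "Washington Luís"), (1930, "Getúlio Vargas")]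

-- Python A: the guards `ano == ""`/`ano is None` are always False for an int and
-- `int(ano)` is the identity on int, so they drop out of the port.
def presidente_federal (ano : Int) : String :=
  (PySem.List.sorted2 presidentes.items (fun p => p.1) (fun p => p.2)).foldl
    (fun escolhido (p : Int × String) => if ano ≥ p.1 then p.2 else escolhido) ""

-- ===== PORT B =====
-- _ANOS = sorted(PRESIDENTES)  (module-level index in Source B)
def anosIdx : List Int := PySem.List.sorted presidentes.keys (fun k => k)

-- bisect.bisect_right is PySem.List.bisectRight; PRESIDENTES[_ANOS[i-1]] always hits
-- an existing key, so the Dict lookup's getD "" default is never taken.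
def presidente_federal_alt (ano : Int) : String :=
  let i := PySem.List.bisectRight anosIdx ano
  if i = 0 then "" else (presidentes.get? ((anosIdx[i-1]?).getD 0)).getD ""

-- ===== PRECONDITION & SPEC =====
def Spec_presidente_federal (ano : Int) (out : String) : Prop := out = presidente_federal_alt ano
instance (ano : Int) (out : String) : Decidable (Spec_presidente_federal ano out) := by unfold Spec_presidente_federal; infer_instance

-- ===== CLAIM (what is proved, stated in full; the proofs are below) =====
def Claim_equal_presidente_federal : Prop := ∀ (ano : Int), Dom_presidente_federal ano → Spec_presidente_federal ano (presidente_federal ano)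

-- ===== LEMMAS AND PROOFS =====
def anosL : List Int := [1889, 1891, 1894, 1898, 1902, 1906, 1909, 1910, 1914, 1918, 1919, 1922, 1926, 1930]

-- the president-by-interval step function both programs compute
def presChain (ano : Int) : String :=
  if ano ≥ 1930 then "Getúlio Vargas" else
  if ano ≥ 1926 then "Washington Luís" else
  if ano ≥ 1922 then "Artur Bernardes" else
  if ano ≥ 1919 then "Epitácio Pessoa" else
  if ano ≥ 1918 then "Delfim Moreira" else
  if ano ≥ 1914 then "Venceslau Brás" else
  if ano ≥ 1910 then "Hermes da Fonseca" else
  if ano ≥ 1909 then "Nilo Peçanha" else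
  if ano ≥ 1906 then "Afonso Pena" else
  if ano ≥ 1902 then "Rodrigues Alves" else
  if ano ≥ 1898 then "Campos Sales" else
  if ano ≥ 1894 then "Prudente de Morais" else
  if ano ≥ 1891 then "Floriano Peixoto" else
  if ano ≥ 1889 then "Deodoro da Fonseca" else
  ""

lemma sorted_items_eq : PySem.List.sorted2 presidentes.items (fun p => p.1) (fun p => p.2) =
    [(1889, "Deodoro da Fonseca"), (1891, "Floriano Peixoto"), (1894, "Prudente de Morais"), (1898, "Campos Sales"), (1902, "Rodrigues Alves"), (1906, "Afonso Pena"), (1909, "Nilo Peçanha"), (1910, "Hermes da Fonseca"), (1914, "Venceslau Brás"), (1918, "Delfim Moreira"), (1919, "Epitácio Pessoa"), (1922, "Artur Bernardes"), (1926, "Washington Luís"), (1930, "Getúlio Vargas")] := by rfl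

lemma anosIdx_eq : anosIdx = anosL := by rfl

lemma a_eq_chain (ano : Int) : presidente_federal ano = presChain ano := by
  rw [presidente_federal, sorted_items_eq, presChain]
  simp only [List.foldl]

lemma chain_0 (ano : Int) (h2 : ano < 1889) : presChain ano = "" := by
  rw [presChain, if_neg (by omega), if_neg (by omega), if_neg (by omega), if_neg (by omega), if_neg (by omega), if_neg (by omega), if_neg (by omega), if_neg (by omega), if_neg (by omega), if_neg (by omega), if_neg (by omega), if_neg (by omega), if_neg (by omega), if_neg (by omega)]

lemma chain_1 (ano : Int) (h1 : 1889 ≤ ano) (h2 : ano < 1891) : presChain ano = "Deodoro da Fonseca" := by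
  rw [presChain, if_neg (by omega), if_neg (by omega), if_neg (by omega), if_neg (by omega), if_neg (by omega), if_neg (by omega), if_neg (by omega), if_neg (by omega), if_neg (by omega), if_neg (by omega), if_neg (by omega), if_neg (by omega), if_neg (by omega), if_pos (by omega)]

lemma chain_2 (ano : Int) (h1 : 1891 ≤ ano) (h2 : ano < 1894) : presChain ano = "Floriano Peixoto" := by
  rw [presChain, if_neg (by omega), if_neg (by omega), if_neg (by omega), if_neg (by omega), if_neg (by omega), if_neg (by omega), if_neg (by omega), if_neg (by omega), if_neg (by omega), if_neg (by omega), if_neg (by omega), if_neg (by omega), if_pos (by omega)]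

lemma chain_3 (ano : Int) (h1 : 1894 ≤ ano) (h2 : ano < 1898) : presChain ano = "Prudente de Morais" := by
  rw [presChain, if_neg (by omega), if_neg (by omega), if_neg (by omega), if_neg (by omega), if_neg (by omega), if_neg (by omega), if_neg (by omega), if_neg (by omega), if_neg (by omega), if_neg (by omega), if_neg (by omega), if_pos (by omega)]

lemma chain_4 (ano : Int) (h1 : 1898 ≤ ano) (h2 : ano < 1902) : presChain ano = "Campos Sales" := by
  rw [presChain, if_neg (by omega), if_neg (by omega), if_neg (by omega), if_neg (by omega), if_neg (by omega), if_neg (by omega), if_neg (by omega), if_neg (by omega), if_neg (by omega), if_neg (by omega), if_pos (by omega)]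

lemma chain_5 (ano : Int) (h1 : 1902 ≤ ano) (h2 : ano < 1906) : presChain ano = "Rodrigues Alves" := by
  rw [presChain, if_neg (by omega), if_neg (by omega), if_neg (by omega), if_neg (by omega), if_neg (by omega), if_neg (by omega), if_neg (by omega), if_neg (by omega), if_neg (by omega), if_pos (by omega)]

lemma chain_6 (ano : Int) (h1 : 1906 ≤ ano) (h2 : ano < 1909) : presChain ano = "Afonso Pena" := by
  rw [presChain, if_neg (by omega), if_neg (by omega), if_neg (by omega), if_neg (by omega), if_neg (by omega), if_neg (by omega), if_neg (by omega), if_neg (by omega), if_pos (by omega)]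

lemma chain_7 (ano : Int) (h1 : 1909 ≤ ano) (h2 : ano < 1910) : presChain ano = "Nilo Peçanha" := by
  rw [presChain, if_neg (by omega), if_neg (by omega), if_neg (by omega), if_neg (by omega), if_neg (by omega), if_neg (by omega), if_neg (by omega), if_pos (by omega)]

lemma chain_8 (ano : Int) (h1 : 1910 ≤ ano) (h2 : ano < 1914) : presChain ano = "Hermes da Fonseca" := by
  rw [presChain, if_neg (by omega), if_neg (by omega), if_neg (by omega), if_neg (by omega), if_neg (by omega), if_neg (by omega), if_pos (by omega)]

lemma chain_9 (ano : Int) (h1 : 1914 ≤ ano) (h2 : ano < 1918) : presChain ano = "Venceslau Brás" := by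
  rw [presChain, if_neg (by omega), if_neg (by omega), if_neg (by omega), if_neg (by omega), if_neg (by omega), if_pos (by omega)]

lemma chain_10 (ano : Int) (h1 : 1918 ≤ ano) (h2 : ano < 1919) : presChain ano = "Delfim Moreira" := by
  rw [presChain, if_neg (by omega), if_neg (by omega), if_neg (by omega), if_neg (by omega), if_pos (by omega)]

lemma chain_11 (ano : Int) (h1 : 1919 ≤ ano) (h2 : ano < 1922) : presChain ano = "Epitácio Pessoa" := by
  rw [presChain, if_neg (by omega), if_neg (by omega), if_neg (by omega), if_pos (by omega)]

lemma chain_12 (ano : Int) (h1 : 1922 ≤ ano) (h2 : ano < 1926) : presChain ano = "Artur Bernardes" := by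
  rw [presChain, if_neg (by omega), if_neg (by omega), if_pos (by omega)]

lemma chain_13 (ano : Int) (h1 : 1926 ≤ ano) (h2 : ano < 1930) : presChain ano = "Washington Luís" := by
  rw [presChain, if_neg (by omega), if_pos (by omega)]

lemma chain_14 (ano : Int) (h1 : 1930 ≤ ano) : presChain ano = "Getúlio Vargas" := by
  rw [presChain, if_pos (by omega)]

set_option maxHeartbeats 1600000 in
theorem presidente_federal_spec : Claim_equal_presidente_federal := by
  intro ano _
  show presidente_federal ano = presidente_federal_alt ano
  rw [a_eq_chain, presidente_federal_alt, anosIdx_eq]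
  show presChain ano =
    (if PySem.List.bisectRight anosL ano = 0 then ""
     else (presidentes.get? ((anosL[PySem.List.bisectRight anosL ano - 1]?).getD 0)).getD "")
  obtain ⟨hle, hlo, hhi⟩ := PySem.List.bisectRight_spec anosL ano (by decide)
  have hlen : anosL.length = 14 := by rfl
  rw [hlen] at hle
  have g0 := hlo 0 (by norm_num [anosL]); have g0' := hhi 0 (by norm_num [anosL])
  have g1 := hlo 1 (by norm_num [anosL]); have g1' := hhi 1 (by norm_num [anosL])
  have g2 := hlo 2 (by norm_num [anosL]); have g2' := hhi 2 (by norm_num [anosL])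
  have g3 := hlo 3 (by norm_num [anosL]); have g3' := hhi 3 (by norm_num [anosL])
  have g4 := hlo 4 (by norm_num [anosL]); have g4' := hhi 4 (by norm_num [anosL])
  have g5 := hlo 5 (by norm_num [anosL]); have g5' := hhi 5 (by norm_num [anosL])
  have g6 := hlo 6 (by norm_num [anosL]); have g6' := hhi 6 (by norm_num [anosL])
  have g7 := hlo 7 (by norm_num [anosL]); have g7' := hhi 7 (by norm_num [anosL])
  have g8 := hlo 8 (by norm_num [anosL]); have g8' := hhi 8 (by norm_num [anosL])
  have g9 := hlo 9 (by norm_num [anosL]); have g9' := hhi 9 (by norm_num [anosL])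
  have g10 := hlo 10 (by norm_num [anosL]); have g10' := hhi 10 (by norm_num [anosL])
  have g11 := hlo 11 (by norm_num [anosL]); have g11' := hhi 11 (by norm_num [anosL])
  have g12 := hlo 12 (by norm_num [anosL]); have g12' := hhi 12 (by norm_num [anosL])
  have g13 := hlo 13 (by norm_num [anosL]); have g13' := hhi 13 (by norm_num [anosL])
  generalize hgi : PySem.List.bisectRight anosL ano = i at hle g0 g0' g1 g1' g2 g2' g3 g3' g4 g4' g5 g5' g6 g6' g7 g7' g8 g8' g9 g9' g10 g10' g11 g11' g12 g12' g13 g13' ⊢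
  simp only [anosL, List.getElem_cons_zero, List.getElem_cons_succ] at g0 g0' g1 g1' g2 g2' g3 g3' g4 g4' g5 g5' g6 g6' g7 g7' g8 g8' g9 g9' g10 g10' g11 g11' g12 g12' g13 g13'
  interval_cases i
  · exact (chain_0 ano (by omega)).trans (by rfl)
  · exact (chain_1 ano (by omega) (by omega)).trans (by rfl)
  · exact (chain_2 ano (by omega) (by omega)).trans (by rfl)
  · exact (chain_3 ano (by omega) (by omega)).trans (by rfl)
  · exact (chain_4 ano (by omega) (by omega)).trans (by rfl)
  · exact (chain_5 ano (by omega) (by omega)).trans (by rfl)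
  · exact (chain_6 ano (by omega) (by omega)).trans (by rfl)
  · exact (chain_7 ano (by omega) (by omega)).trans (by rfl)
  · exact (chain_8 ano (by omega) (by omega)).trans (by rfl)
  · exact (chain_9 ano (by omega) (by omega)).trans (by rfl)
  · exact (chain_10 ano (by omega) (by omega)).trans (by rfl)
  · exact (chain_11 ano (by omega) (by omega)).trans (by rfl)
  · exact (chain_12 ano (by omega) (by omega)).trans (by rfl)
  · exact (chain_13 ano (by omega) (by omega)).trans (by rfl)
  · exact (chain_14 ano (by omega)).trans (by rfl)
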